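-- pv_equiv track=rewrite | github.com/OSInsight/paper2wechat | paper2wechat/core/content_adapter.py | _trim_markdown_by_budget
-- ===== SOURCE A (Python) =====
-- from typing import Dict, List, Optional, Sequence
--
-- def _trim_markdown_by_budget(text: str, max_length: int) -> str:
--     # For Chinese article output, approximate 1 word ~= 2-3 chars.
--     max_chars = max(900, max_length * 3)
--     if len(text) <= max_chars:
--         return text
--
--     lines = text.splitlines()
--     kept: List[str] = []
--     total = 0
--     for line in lines:
--         candidate = line + "\n"
--         if total + len(candidate) > max_chars:
--             break
--         kept.append(line)
--         total += len(candidate)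
--
--     return "\n".join(kept).strip()
-- ===== SOURCE B (Python) =====
-- from typing import Dict, List, Optional, Sequence
--
--
-- def _trim_markdown_by_budget(text: str, max_length: int) -> str:
--     # For Chinese article output, approximate 1 word ~= 2-3 chars.
--     max_chars = max(900, max_length * 3)
--     if len(text) <= max_chars:
--         return text
--
--     lines = text.splitlines()
--     total = sum(len(line) + 1 for line in lines)
--     while lines and total > max_chars:
--         total -= len(lines.pop()) + 1
--     return "\n".join(lines).strip()
-- ===== Notes on version B (the rewrite author's own statement) =====
-- stated objective: alternative
-- what changed: A grows the kept prefix front-to-back with a running total and breaks on overflow; B computes the full cost once and pops lines off the END until the total fits the budget (shrink-from-the-end instead of grow-from-the-front).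
import Mathlib
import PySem

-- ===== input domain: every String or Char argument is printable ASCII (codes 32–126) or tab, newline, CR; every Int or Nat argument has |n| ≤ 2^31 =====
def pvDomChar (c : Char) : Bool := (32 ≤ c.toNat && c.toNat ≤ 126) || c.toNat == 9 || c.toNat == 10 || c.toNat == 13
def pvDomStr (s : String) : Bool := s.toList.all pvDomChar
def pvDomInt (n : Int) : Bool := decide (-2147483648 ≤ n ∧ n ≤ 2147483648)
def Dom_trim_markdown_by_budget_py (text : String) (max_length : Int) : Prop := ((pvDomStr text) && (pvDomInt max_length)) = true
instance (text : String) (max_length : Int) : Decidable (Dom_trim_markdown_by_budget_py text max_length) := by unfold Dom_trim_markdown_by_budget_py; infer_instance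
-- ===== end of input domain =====

-- B computes the full line cost once and pops lines off the END until the total fits the budget, instead of A's grow-from-the-front loop (alternative decomposition, same cost).

-- ===== PORT A =====
-- the 'for line in lines: … break' loop, carrying the running total
def pvKeepA : List String → Int → Int → List String
  | [], _, _ => []
  | line :: rest, max_chars, total =>
      let candidate := PySem.Str.len line + 1   -- len(line + "\n")
      if total + candidate > max_chars then []
      else line :: pvKeepA rest max_chars (total + candidate)

def trim_markdown_by_budget_py (text : String) (max_length : Int) : String :=
  let max_chars := max 900 (max_length * 3)
  if PySem.Str.len text ≤ max_chars then text
  else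
    let lines := PySem.Str.splitlines text
    let kept := pvKeepA lines max_chars 0
    PySem.Str.strip (PySem.Str.join "\n" kept)

-- ===== PORT B =====
-- total = sum(len(line) + 1 for line in lines)
def pvCostB (ls : List String) : Int := (ls.map (fun l => PySem.Str.len l + 1)).sum

-- the 'while lines and total > max_chars: total -= len(lines.pop()) + 1' loop,
-- transcribed as structural recursion on the REVERSED list (pop removes the head of the reverse)
def pvShrinkB : List String → Int → Int → List String
  | [], _, _ => []
  | l :: rest, total, max_chars =>
      if total > max_chars then pvShrinkB rest (total - (PySem.Str.len l + 1)) max_chars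
      else l :: rest

def trim_markdown_by_budget_py_alt (text : String) (max_length : Int) : String :=
  let max_chars := max 900 (max_length * 3)
  if PySem.Str.len text ≤ max_chars then text
  else
    let lines := PySem.Str.splitlines text
    let total := pvCostB lines
    let kept := (pvShrinkB lines.reverse total max_chars).reverse
    PySem.Str.strip (PySem.Str.join "\n" kept)

-- ===== PRECONDITION & SPEC =====
def Spec_trim_markdown_by_budget_py (text : String) (max_length : Int) (out : String) : Prop := out = trim_markdown_by_budget_py_alt text max_length
instance (text : String) (max_length : Int) (out : String) : Decidable (Spec_trim_markdown_by_budget_py text max_length out) := by unfold Spec_trim_markdown_by_budget_py; infer_instance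

-- ===== CLAIM =====
def Claim_equal_trim_markdown_by_budget_py : Prop := ∀ (text : String) (max_length : Int), Dom_trim_markdown_by_budget_py text max_length → Spec_trim_markdown_by_budget_py text max_length (trim_markdown_by_budget_py text max_length)

-- ===== LEMMAS AND PROOFS =====

-- cumulative costs of the lines (proof-only device characterising both loops)
def pvCum : List String → Int → List Int
  | [], _ => []
  | line :: rest, acc =>
      let acc' := acc + (PySem.Str.len line + 1)
      acc' :: pvCum rest acc'

theorem pvCostB_nonneg (ls : List String) : (0:Int) ≤ pvCostB ls := by
  apply List.sum_nonneg
  intro y hy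
  simp only [List.mem_map] at hy
  obtain ⟨l', _, rfl⟩ := hy
  rw [PySem.Str.len_eq]; positivity

theorem pvCum_length (ls : List String) (acc : Int) :
    (pvCum ls acc).length = ls.length := by
  induction ls generalizing acc with
  | nil => simp [pvCum]
  | cons l rest ih => simp [pvCum, ih]

theorem pvCum_append (xs ys : List String) (acc : Int) :
    pvCum (xs ++ ys) acc = pvCum xs acc ++ pvCum ys (acc + pvCostB xs) := by
  induction xs generalizing acc with
  | nil => simp [pvCum, pvCostB]
  | cons x rest ih =>
      simp only [List.cons_append, pvCum, ih, pvCostB, List.map_cons, List.sum_cons]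
      congr 3
      ring

theorem pvCum_mem_gt (ls : List String) (acc : Int) :
    ∀ x ∈ pvCum ls acc, acc < x := by
  induction ls generalizing acc with
  | nil => simp [pvCum]
  | cons l rest ih =>
      intro x hx
      simp only [pvCum, List.mem_cons] at hx
      have hlen : 0 ≤ PySem.Str.len l := by
        rw [PySem.Str.len_eq]; positivity
      rcases hx with h | h
      · omega
      · have := ih (acc + (PySem.Str.len l + 1)) x h
        omega

theorem pvCum_mem_le (ls : List String) (acc : Int) :
    ∀ x ∈ pvCum ls acc, x ≤ acc + pvCostB ls := by
  induction ls generalizing acc with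
  | nil => simp [pvCum]
  | cons l rest ih =>
      intro x hx
      simp only [pvCum, List.mem_cons] at hx
      have hcost : (0:Int) ≤ pvCostB rest := pvCostB_nonneg rest
      rcases hx with h | h
      · simp only [pvCostB, List.map_cons, List.sum_cons]
        simp only [pvCostB] at hcost
        omega
      · have := ih (acc + (PySem.Str.len l + 1)) x h
        simp only [pvCostB, List.map_cons, List.sum_cons] at this ⊢
        omega

-- A's greedy loop keeps exactly the lines whose cumulative cost stays ≤ max_chars
theorem keepA_eq_take_countP (ls : List String) (mc total : Int) :
    pvKeepA ls mc total = ls.take ((pvCum ls total).countP (fun y => y ≤ mc)) := by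
  induction ls generalizing total with
  | nil => simp [pvKeepA, pvCum]
  | cons l rest ih =>
      by_cases h : mc < total + ((l.length : Int) + 1)
      · have hzero : (pvCum (l :: rest) total).countP (fun y => y ≤ mc) = 0 := by
          rw [List.countP_eq_zero]
          intro y hy
          simp only [pvCum, PySem.Str.len_eq, List.mem_cons] at hy
          have hl : l.toList.length = l.length := by simp
          rcases hy with h' | h'
          · simp only [decide_eq_true_eq]; omega
          · have hgt := pvCum_mem_gt rest _ y h'
            simp only [decide_eq_true_eq]; omega
        rw [hzero]
        simp [pvKeepA, h]
      · have hstep : pvKeepA (l :: rest) mc total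
            = l :: pvKeepA rest mc (total + ((l.length : Int) + 1)) := by
          simp [pvKeepA, h]
        have hacc : total + ((l.length : Int) + 1) ≤ mc := by omega
        have hcnt : (pvCum (l :: rest) total).countP (fun y => y ≤ mc)
            = (pvCum rest (total + ((l.length : Int) + 1))).countP (fun y => y ≤ mc) + 1 := by
          simp [pvCum, hacc]
        rw [hstep, ih, hcnt, List.take_succ_cons]

-- B's pop-from-the-end loop keeps the same lines
theorem shrinkB_eq_take_countP (ls : List String) (mc : Int) :
    pvShrinkB ls.reverse (pvCostB ls) mc
      = (ls.take ((pvCum ls 0).countP (fun y => y ≤ mc))).reverse := by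
  induction ls using List.reverseRecOn with
  | nil => simp [pvShrinkB, pvCum]
  | append_singleton xs x ih =>
      have hcum : pvCum (xs ++ [x]) 0
          = pvCum xs 0 ++ [pvCostB xs + (PySem.Str.len x + 1)] := by
        rw [pvCum_append]
        simp [pvCum]
      have htot : pvCostB (xs ++ [x]) = pvCostB xs + (PySem.Str.len x + 1) := by
        simp [pvCostB]
      by_cases h : pvCostB xs + (PySem.Str.len x + 1) > mc
      · have hstep : pvShrinkB ((xs ++ [x]).reverse) (pvCostB (xs ++ [x])) mc
            = pvShrinkB xs.reverse (pvCostB xs) mc := by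
          simp only [List.reverse_append, List.reverse_singleton, List.singleton_append,
            pvShrinkB, htot]
          rw [if_pos h]
          congr 1
          ring
        have hcnt : ((pvCum (xs ++ [x]) 0).countP (fun y => y ≤ mc))
            = (pvCum xs 0).countP (fun y => y ≤ mc) := by
          rw [hcum, List.countP_append]
          simp only [List.countP_cons, List.countP_nil, decide_eq_true_eq]
          rw [if_neg (by omega)]
          omega
        have hk : (pvCum xs 0).countP (fun y => y ≤ mc) ≤ xs.length := by
          calc (pvCum xs 0).countP (fun y => y ≤ mc) ≤ (pvCum xs 0).length :=
                List.countP_le_length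
            _ = xs.length := pvCum_length xs 0
        rw [hstep, ih, hcnt, List.take_append_of_le_length hk]
      · -- total fits: everything is kept
        have hall : (pvCum (xs ++ [x]) 0).countP (fun y => y ≤ mc)
            = (xs ++ [x]).length := by
          rw [← pvCum_length (xs ++ [x]) 0, List.countP_eq_length]
          intro y hy
          have := pvCum_mem_le (xs ++ [x]) 0 y hy
          rw [htot] at this
          simp only [decide_eq_true_eq]
          omega
        have hne : (xs ++ [x]).reverse = x :: xs.reverse := by simp
        rw [hne]
        simp only [pvShrinkB, htot]
        rw [if_neg (by omega), hall]
        rw [List.take_length, ← hne]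

-- ===== VERDICT =====
theorem trim_markdown_by_budget_py_spec : Claim_equal_trim_markdown_by_budget_py := by
  intro text max_length _
  unfold Spec_trim_markdown_by_budget_py
  simp only [trim_markdown_by_budget_py, trim_markdown_by_budget_py_alt]
  split_ifs with h
  · rfl
  · rw [keepA_eq_take_countP, shrinkB_eq_take_countP, List.reverse_reverse]
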